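-- pv_equiv track=rewrite | github.com/mjrc/web_or_nep | featureset.py | get_words_from_subwords
-- ===== SOURCE A (Python) =====
-- def get_words_from_subwords(wordset):
--     final_wordset = wordset.copy()
--
--     while len(wordset) > 0:
--         longest = max(wordset, key=len)
--         wordset.remove(longest)
--
--         for element in wordset:
--             if element in longest:
--                 final_wordset.remove(element)
--
--         wordset.intersection_update(final_wordset)
--     return final_wordset
-- ===== SOURCE B (Python) =====
-- def get_words_from_subwords(wordset):
--     return {w for w in wordset
--             if not any(len(v) > len(w) and w in v for v in wordset)}
-- ===== Notes on version B (the rewrite author's own statement) =====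
-- stated objective: simpler
-- what changed: A's destructive loop (repeatedly extract the longest word, delete its subwords from both sets, intersect) is replaced by a single non-mutating set comprehension keeping exactly the words that are not a substring of a strictly longer word.
import Mathlib
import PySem

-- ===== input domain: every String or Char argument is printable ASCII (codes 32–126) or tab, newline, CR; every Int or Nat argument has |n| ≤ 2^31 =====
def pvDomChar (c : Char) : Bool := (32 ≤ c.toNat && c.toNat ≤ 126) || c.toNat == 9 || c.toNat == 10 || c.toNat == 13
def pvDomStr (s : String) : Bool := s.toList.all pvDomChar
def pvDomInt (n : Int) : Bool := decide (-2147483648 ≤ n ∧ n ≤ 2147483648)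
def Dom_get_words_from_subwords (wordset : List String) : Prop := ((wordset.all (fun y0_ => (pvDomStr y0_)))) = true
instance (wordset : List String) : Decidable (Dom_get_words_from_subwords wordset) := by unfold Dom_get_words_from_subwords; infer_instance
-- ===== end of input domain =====

-- B replaces A's destructive longest-first elimination loop by a single non-mutating set
-- comprehension (objective: simpler).  Equivalence is about the RETURN value only: Python A
-- empties its argument set in place, B does not mutate it.

-- ===== PORT A =====
-- 'while len(wordset) > 0: longest = max(wordset, key=len); wordset.remove(longest);
--  for element in wordset: if element in longest: final_wordset.remove(element);
--  wordset.intersection_update(final_wordset)'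
-- set.remove is PySem.Set.discard here: 'longest' is in wordset, and every removed 'element'
-- is in final_wordset (wordset is kept intersected with final_wordset), so KeyError never
-- occurs.  (max over a set: which of several equally longest words is picked depends on
-- Python's hash order, but the returned set is the same for every pick.)
def awLoop (ws fs : List String) : List String :=
  match hm : PySem.List.max? ws PySem.Str.len with
  | none => fs
  | some m =>
      let ws1 := PySem.Set.discard ws m
      let fs1 := ws1.foldl (fun fs e => if PySem.Str.isIn e m then PySem.Set.discard fs e else fs) fs
      awLoop (PySem.Set.inter ws1 fs1) fs1
  termination_by ws.length
  decreasing_by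
    have hmem : m ∈ ws := PySem.List.max?_mem hm
    calc (PySem.Set.inter ws1 fs1).length
        ≤ ws1.length := List.length_filter_le _ _
      _ < ws.length := by
          simp only [ws1, PySem.Set.discard]
          exact List.length_filter_lt_length_iff_exists.mpr ⟨m, hmem, by simp⟩

-- the set-typed argument is its list of distinct elements
def get_words_from_subwords (wordset : List String) : List String :=
  let ws := PySem.Set.ofList wordset
  awLoop ws ws     -- final_wordset = wordset.copy()

-- ===== PORT B =====
def get_words_from_subwords_alt (wordset : List String) : List String :=
  let s := PySem.Set.ofList wordset
  s.filter (fun w => !(s.any (fun v => decide (PySem.Str.len w < PySem.Str.len v) && PySem.Str.isIn w v)))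

-- ===== PRECONDITION & SPEC =====
def Spec_get_words_from_subwords (wordset : List String) (out : List String) : Prop := out = get_words_from_subwords_alt wordset
instance (wordset : List String) (out : List String) : Decidable (Spec_get_words_from_subwords wordset out) := by unfold Spec_get_words_from_subwords; infer_instance

-- ===== CLAIM (what is proved, stated in full; the proofs are below) =====
def Claim_equal_get_words_from_subwords : Prop := ∀ (wordset : List String), Dom_get_words_from_subwords wordset → Spec_get_words_from_subwords wordset (get_words_from_subwords wordset)

-- ===== LEMMAS AND PROOFS =====

-- 'w is eliminated by the remaining set ws': w ∈ ws and some strictly longer v ∈ ws contains it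
def pvKill (ws : List String) (w : String) : Bool :=
  decide (w ∈ ws) && ws.any (fun v => decide (PySem.Str.len w < PySem.Str.len v) && PySem.Str.isIn w v)

lemma mem_discard {ws : List String} {m w : String} :
    w ∈ PySem.Set.discard ws m ↔ w ∈ ws ∧ w ≠ m := by
  simp [PySem.Set.discard, List.mem_filter]

-- an infix of no smaller length is the string itself
lemma infix_len_eq {w m : String} (h : w.toList <:+: m.toList)
    (hlen : PySem.Str.len m ≤ PySem.Str.len w) : w = m := by
  have h1 : w.toList = m.toList := by
    refine List.Sublist.eq_of_length_le h.sublist ?_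
    simp only [PySem.Str.len] at hlen
    exact_mod_cast hlen
  exact String.toList_inj.mp h1

-- the inner for-loop removes from fs exactly the members of ws1 that occur in m
lemma kill_fold_eq (ws1 fs : List String) (m : String) :
    ws1.foldl (fun fs e => if PySem.Str.isIn e m then PySem.Set.discard fs e else fs) fs
      = fs.filter (fun w => !(decide (w ∈ ws1) && PySem.Str.isIn w m)) := by
  induction ws1 generalizing fs with
  | nil => simp
  | cons e t ih =>
    simp only [List.foldl_cons, ih]
    by_cases h : PySem.Str.isIn e m = true
    · rw [if_pos h]
      simp only [PySem.Set.discard, List.filter_filter]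
      refine List.filter_congr ?_
      intro w _
      by_cases hwe : w = e
      · subst hwe
        simp only [PySem.Str.isIn] at h
        simp [h]
      · simp [hwe]
    · rw [if_neg h]
      refine List.filter_congr ?_
      intro w _
      by_cases hwe : w = e
      · subst hwe
        simp only [PySem.Str.isIn, Bool.not_eq_true] at h
        simp [h]
      · simp [hwe]

-- one round of A's loop (longest word m) eliminates the subwords of m now and the rest later
lemma kill_step (ws : List String) (m : String)
    (hm : PySem.List.max? ws PySem.Str.len = some m) (w : String) :
    pvKill ws w
      = ((decide (w ∈ PySem.Set.discard ws m) && PySem.Str.isIn w m)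
          || pvKill ((PySem.Set.discard ws m).filter (fun v => !PySem.Str.isIn v m)) w) := by
  have hmax : ∀ y ∈ ws, PySem.Str.len y ≤ PySem.Str.len m := PySem.List.max?_isMax hm
  rw [Bool.eq_iff_iff]
  simp only [pvKill, Bool.or_eq_true, Bool.and_eq_true, List.any_eq_true, decide_eq_true_eq,
    mem_discard, List.mem_filter, Bool.not_eq_true']
  constructor
  · rintro ⟨hw, v, hv, hlt, hin⟩
    have hwm : w ≠ m := by
      intro he; subst he
      exact absurd (hmax v hv) (not_le.mpr hlt)
    by_cases hc : PySem.Str.isIn w m = true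
    · exact Or.inl ⟨⟨hw, hwm⟩, hc⟩
    · refine Or.inr ⟨⟨⟨hw, hwm⟩, by simpa using hc⟩, v, ⟨⟨hv, ?_⟩, ?_⟩, hlt, hin⟩
      · intro he; subst he; exact hc hin
      · rw [Bool.eq_false_iff]
        intro hvm
        exact hc (((PySem.Str.isIn_iff_infix _ _).mpr
          (((PySem.Str.isIn_iff_infix _ _).mp hin).trans ((PySem.Str.isIn_iff_infix _ _).mp hvm))))
  · rintro (⟨⟨hw, hwm⟩, hin⟩ | ⟨⟨⟨hw, _⟩, _⟩, v, ⟨⟨hv, _⟩, _⟩, hlt, hin⟩)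
    · refine ⟨hw, m, PySem.List.max?_mem hm, ?_, hin⟩
      refine lt_of_le_of_ne (hmax w hw) ?_
      intro hlen
      exact hwm (infix_len_eq ((PySem.Str.isIn_iff_infix _ _).mp hin) (le_of_eq hlen.symm))
    · exact ⟨hw, v, hv, hlt, hin⟩

-- A's loop keeps exactly the members of fs not eliminated by ws
lemma awLoop_eq (n : Nat) : ∀ (ws fs : List String), ws.length ≤ n →
    (∀ w ∈ ws, w ∈ fs) →
    awLoop ws fs = fs.filter (fun w => !pvKill ws w) := by
  induction n with
  | zero =>
    intro ws fs h _
    have hws : ws = [] := List.eq_nil_of_length_eq_zero (Nat.le_zero.mp h)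
    subst hws
    rw [awLoop]
    simp [PySem.List.max?, pvKill]
  | succ n ih =>
    intro ws fs h hsub
    rw [awLoop]
    cases hm : PySem.List.max? ws PySem.Str.len with
    | none =>
      have hws : ws = [] := (PySem.List.max?_eq_none_iff _ _).mp hm
      subst hws
      simp [pvKill]
    | some m =>
      simp only
      rw [kill_fold_eq]
      have hlt : (PySem.Set.discard ws m).length < ws.length := by
        simp only [PySem.Set.discard]
        exact List.length_filter_lt_length_iff_exists.mpr ⟨m, PySem.List.max?_mem hm, by simp⟩
      have hws2 : PySem.Set.inter (PySem.Set.discard ws m)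
            (fs.filter (fun w => !(decide (w ∈ PySem.Set.discard ws m) && PySem.Str.isIn w m)))
          = (PySem.Set.discard ws m).filter (fun v => !PySem.Str.isIn v m) := by
        refine List.filter_congr ?_
        intro v hv
        rcases mem_discard.mp hv with ⟨hv1, hv2⟩
        have hvfs : v ∈ fs := hsub v hv1
        by_cases hvm : PySem.Chars.isIn v.toList m.toList = true
        · simp [List.mem_filter, hvm, PySem.Str.isIn]
          exact fun _ => ⟨hv1, hv2⟩
        · simp only [Bool.not_eq_true] at hvm
          simp [List.mem_filter, hvm, hvfs, PySem.Str.isIn]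
      rw [hws2]
      rw [ih ((PySem.Set.discard ws m).filter (fun v => !PySem.Str.isIn v m)) _
            (by
              have h2 := List.length_filter_le (fun v => !PySem.Str.isIn v m) (PySem.Set.discard ws m)
              omega)
            (by
              intro w hw
              rcases List.mem_filter.mp hw with ⟨hw1, hw2⟩
              refine List.mem_filter.mpr ⟨hsub w (mem_discard.mp hw1).1, ?_⟩
              simp only [Bool.not_eq_true'] at hw2
              simp only [PySem.Str.isIn] at hw2
              simp [hw2])]
      rw [List.filter_filter]
      refine List.filter_congr ?_
      intro w _
      rw [kill_step ws m hm w]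
      simp [Bool.not_or, Bool.and_comm]

-- ===== VERDICT (by name: the statement is the Claim_ definition above) =====
theorem get_words_from_subwords_spec : Claim_equal_get_words_from_subwords := by
  intro wordset _
  unfold Spec_get_words_from_subwords get_words_from_subwords get_words_from_subwords_alt
  rw [awLoop_eq (PySem.Set.ofList wordset).length _ _ le_rfl (fun w h => h)]
  refine List.filter_congr ?_
  intro w hw
  simp [pvKill, hw]
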